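-- pv_equiv track=rewrite | github.com/dev2359/shopline-detail-image-download | shopline_image_downloader.py | scan_shopline_urls
-- ===== SOURCE A (Python) =====
-- def scan_shopline_urls(html: str) -> list[str]:
--     prefixes = [
--         "https://img.shoplineapp.com/media/image_clips/",
--         "https://shoplineimg.com/",
--     ]
--     results: list[str] = []
--     stop_chars = set(['"', "'", " ", "\\", ")", ">"])
--
--     for prefix in prefixes:
--         start = 0
--         while True:
--             idx = html.find(prefix, start)
--             if idx == -1:
--                 break
--             end = idx
--             while end < len(html) and html[end] not in stop_chars:
--                 end += 1
--             url = html[idx:end]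
--             url = url.replace("\\u0026", "&").replace("&amp;", "&")
--             results.append(url)
--             start = end
--     return results
-- ===== SOURCE B (Python) =====
-- import re
--
-- def scan_shopline_urls(html: str) -> list[str]:
--     prefixes = [
--         "https://img.shoplineapp.com/media/image_clips/",
--         "https://shoplineimg.com/",
--     ]
--     # split once at the stop characters; each token is a maximal run of URL chars
--     tokens = re.split(r"[\"' \\)>]", html)
--     results: list[str] = []
--     for prefix in prefixes:
--         for token in tokens:
--             j = token.find(prefix)
--             if j != -1:
--                 results.append(token[j:].replace("\\u0026", "&").replace("&amp;", "&"))
--     return results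
-- ===== Notes on version B (the rewrite author's own statement) =====
-- stated objective: simpler
-- what changed: A repeatedly calls html.find for each prefix and extends every hit with a manual inner character scan while tracking a cursor; B splits the html once at the six stop characters with re.split and then, per prefix, keeps token[token.find(prefix):] for each token containing the prefix.
import Mathlib
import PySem

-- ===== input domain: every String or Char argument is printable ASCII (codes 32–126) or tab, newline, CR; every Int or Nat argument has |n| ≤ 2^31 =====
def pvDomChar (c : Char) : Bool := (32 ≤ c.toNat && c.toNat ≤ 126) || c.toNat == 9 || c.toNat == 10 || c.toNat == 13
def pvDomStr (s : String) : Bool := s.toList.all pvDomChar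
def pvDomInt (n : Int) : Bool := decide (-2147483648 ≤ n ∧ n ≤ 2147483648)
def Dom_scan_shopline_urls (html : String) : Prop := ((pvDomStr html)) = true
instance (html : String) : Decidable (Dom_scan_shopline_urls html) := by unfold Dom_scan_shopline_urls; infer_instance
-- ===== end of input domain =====

-- B replaces A's repeated find + inner character scan by splitting the html once at the stop
-- characters and keeping, per prefix, each token that contains the prefix (objective: simpler).

-- ===== PORT A =====
-- stop_chars = set(['"', "'", " ", "\\", ")", ">"])
def pvStop (c : Char) : Bool := c == '"' || c == '\'' || c == ' ' || c == '\\' || c == ')' || c == '>'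

def pvNS (c : Char) : Bool := !pvStop c

-- url.replace("\\u0026", "&").replace("&amp;", "&")  (shared by both ports)
def pvRepl (l : List Char) : String :=
  PySem.Str.replace (PySem.Str.replace (String.ofList l) "\\u0026" "&") "&amp;" "&"

-- Python's s.find(needle) as an Option-valued first-occurrence index (shared helper)
def pvFind (p : List Char) : List Char → Option Nat
  | [] => if p.isPrefixOf ([] : List Char) then some 0 else none
  | c :: cs => if p.isPrefixOf (c :: cs) then some 0 else (pvFind p cs).map (· + 1)

def pvPfx1 : List Char := "https://img.shoplineapp.com/media/image_clips/".toList
def pvPfx2 : List Char := "https://shoplineimg.com/".toList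

-- A's `while True` loop for one prefix; the cursor `start` is kept as the remaining suffix.
-- `idx = html.find(prefix, start)` → pvFind on the suffix; the inner `while … not in stop_chars`
-- scan → takeWhile; `start = end` → recurse on the suffix after `end`. Fuel only makes the
-- loop total (it never runs out: each iteration consumes at least one character).
def pvALoop (p : List Char) (t : List Char) (fuel : Nat) : List String :=
  match fuel with
  | 0 => []
  | fuel + 1 =>
    match pvFind p t with
    | none => []
    | some i =>
      let u := t.drop i
      let url := u.takeWhile pvNS
      pvRepl url :: pvALoop p (u.drop url.length) fuel

def scan_shopline_urls (html : String) : List String :=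
  pvALoop pvPfx1 html.toList (html.toList.length + 1) ++
    pvALoop pvPfx2 html.toList (html.toList.length + 1)

-- ===== PORT B =====
-- re.split(r"[\"' \\)>]", html): cut at every stop character, keeping empty pieces
def pvSplit (t : List Char) : List (List Char) :=
  match h : t.dropWhile pvNS with
  | [] => [t.takeWhile pvNS]
  | _ :: ds => t.takeWhile pvNS :: pvSplit ds
termination_by t.length
decreasing_by
  have h1 := congrArg List.length h
  have h2 := List.length_dropWhile_le pvNS t
  simp at h1
  omega

-- j = token.find(prefix); if j != -1: keep token[j:].replace(…).replace(…)
def pvMatch (p tok : List Char) : Option String :=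
  (pvFind p tok).map (fun j => pvRepl (tok.drop j))

def scan_shopline_urls_alt (html : String) : List String :=
  (pvSplit html.toList).filterMap (pvMatch pvPfx1) ++
    (pvSplit html.toList).filterMap (pvMatch pvPfx2)

-- ===== PRECONDITION & SPEC =====
def Spec_scan_shopline_urls (html : String) (out : List String) : Prop := out = scan_shopline_urls_alt html
instance (html : String) (out : List String) : Decidable (Spec_scan_shopline_urls html out) := by unfold Spec_scan_shopline_urls; infer_instance

-- ===== CLAIM (what is proved, stated in full; the proofs are below) =====
def Claim_equal_scan_shopline_urls : Prop := ∀ (html : String), Dom_scan_shopline_urls html → Spec_scan_shopline_urls html (scan_shopline_urls html)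

-- ===== LEMMAS AND PROOFS =====

theorem pvFind_nil_of_ne (p : List Char) (hp : p ≠ []) : pvFind p [] = none := by
  cases p with
  | nil => exact absurd rfl hp
  | cons a as => simp [pvFind, List.isPrefixOf]

theorem pvFind_of_prefix (p u : List Char) (hp : p ≠ []) (h : p.isPrefixOf u = true) :
    pvFind p u = some 0 := by
  cases u with
  | nil =>
    obtain ⟨a, as, rfl⟩ := List.exists_cons_of_ne_nil hp
    simp [List.isPrefixOf] at h
  | cons c cs => simp [pvFind, h]

theorem pvALoop_nil (p : List Char) (hp : p ≠ []) (f : Nat) : pvALoop p [] f = [] := by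
  cases f with
  | zero => rfl
  | succ f => simp [pvALoop, pvFind_nil_of_ne p hp]

-- skipping one non-matching character leaves A's loop value unchanged (same fuel)
theorem pvALoop_skip (p : List Char) (c : Char) (cs : List Char)
    (h : p.isPrefixOf (c :: cs) = false) (f : Nat) :
    pvALoop p (c :: cs) f = pvALoop p cs f := by
  cases f with
  | zero => rfl
  | succ f =>
    simp only [pvALoop, pvFind, h, Bool.false_eq_true, if_false]
    cases hf : pvFind p cs with
    | none => simp
    | some i => simp [List.drop_succ_cons]

theorem pvSplit_eq (t : List Char) :
    pvSplit t = t.takeWhile pvNS ::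
      (match t.dropWhile pvNS with | [] => [] | _ :: ds => pvSplit ds) := by
  rw [pvSplit]
  cases h : t.dropWhile pvNS <;> simp [h]

theorem pvSplit_cons_stop (c : Char) (cs : List Char) (h : pvNS c = false) :
    pvSplit (c :: cs) = [] :: pvSplit cs := by
  rw [pvSplit_eq, List.takeWhile_cons_of_neg (by simp [h]),
      List.dropWhile_cons_of_neg (by simp [h])]

theorem pvStop_of_dropWhile (t : List Char) (d : Char) (ds : List Char)
    (h : t.dropWhile pvNS = d :: ds) : pvNS d = false := by
  induction t with
  | nil => simp at h
  | cons e es ih =>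
    by_cases he : pvNS e = true
    · rw [List.dropWhile_cons_of_pos he] at h; exact ih h
    · rw [List.dropWhile_cons_of_neg he] at h
      cases h; simpa using he

theorem pvNotPrefix_of_stop (p : List Char) (hp : p ≠ []) (hns : ∀ a ∈ p, pvNS a = true)
    (d : Char) (ds : List Char) (hd : pvNS d = false) :
    p.isPrefixOf (d :: ds) = false := by
  obtain ⟨q, p', rfl⟩ := List.exists_cons_of_ne_nil hp
  have hq : pvNS q = true := hns q List.mem_cons_self
  have hne : q ≠ d := by intro h; rw [h, hd] at hq; cases hq
  simp [List.isPrefixOf, hne]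

theorem pvPrefix_takeWhile (p : List Char) (hns : ∀ a ∈ p, pvNS a = true) :
    ∀ t : List Char, p.isPrefixOf t = true → p.isPrefixOf (t.takeWhile pvNS) = true := by
  induction p with
  | nil => intro t _; simp [List.isPrefixOf]
  | cons a p' ih =>
    intro t h
    cases t with
    | nil => simp [List.isPrefixOf] at h
    | cons c t' =>
      simp only [List.isPrefixOf, Bool.and_eq_true, beq_iff_eq] at h
      obtain ⟨rfl, h2⟩ := h
      have hc : pvNS a = true := hns a List.mem_cons_self
      rw [List.takeWhile_cons_of_pos hc]
      simp only [List.isPrefixOf, Bool.and_eq_true, beq_self_eq_true, true_and]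
      exact ih (fun x hx => hns x (List.mem_cons_of_mem _ hx)) t' h2

theorem pvDrop_takeWhile_length (q : Char → Bool) (l : List Char) :
    l.drop (l.takeWhile q).length = l.dropWhile q := by
  induction l with
  | nil => rfl
  | cons c cs ih =>
    by_cases hq : q c = true
    · rw [List.takeWhile_cons_of_pos hq, List.dropWhile_cons_of_pos hq,
          List.length_cons, List.drop_succ_cons, ih]
    · rw [List.takeWhile_cons_of_neg hq, List.dropWhile_cons_of_neg hq,
          List.length_nil, List.drop_zero]

theorem pvMatch_nil (p : List Char) (hp : p ≠ []) : pvMatch p [] = none := by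
  simp [pvMatch, pvFind_nil_of_ne p hp]

theorem pvMatch_cons_ns (p : List Char) (c : Char) (tok : List Char)
    (h : p.isPrefixOf (c :: tok) = false) :
    pvMatch p (c :: tok) = pvMatch p tok := by
  simp only [pvMatch, pvFind, h, Bool.false_eq_true, if_false]
  cases pvFind p tok <;> simp [List.drop_succ_cons]

-- the heart: A's scan loop equals B's split-then-filter, token by token
theorem pvMain (p : List Char) (hp : p ≠ []) (hns : ∀ a ∈ p, pvNS a = true) :
    ∀ (n : Nat) (t : List Char), t.length ≤ n → ∀ f, t.length < f →
      pvALoop p t f = (pvSplit t).filterMap (pvMatch p) := by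
  intro n
  induction n with
  | zero =>
    intro t ht f _
    have : t = [] := List.eq_nil_of_length_eq_zero (Nat.le_zero.mp ht)
    subst this
    rw [pvALoop_nil p hp, pvSplit_eq]
    simp [pvMatch_nil p hp]
  | succ m ih =>
    intro t ht f hf
    cases t with
    | nil =>
      rw [pvALoop_nil p hp, pvSplit_eq]
      simp [pvMatch_nil p hp]
    | cons c cs =>
      by_cases hc : pvNS c = true
      · by_cases hpre : p.isPrefixOf (c :: cs) = true
        · -- a match starts right here: the whole first token is reported
          cases f with
          | zero => exact absurd hf (by simp)
          | succ f' =>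
            have hfind : pvFind p (c :: cs) = some 0 := by simp [pvFind, hpre]
            have hurl : p.isPrefixOf ((c :: cs).takeWhile pvNS) = true :=
              pvPrefix_takeWhile p hns _ hpre
            simp only [pvALoop, hfind, List.drop_zero, pvDrop_takeWhile_length]
            rw [pvSplit_eq (c :: cs), List.filterMap_cons]
            have hm : pvMatch p ((c :: cs).takeWhile pvNS) =
                some (pvRepl ((c :: cs).takeWhile pvNS)) := by
              simp [pvMatch, pvFind_of_prefix p _ hp hurl]
            rw [hm]
            refine congrArg _ ?_
            cases hd : (c :: cs).dropWhile pvNS with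
            | nil => rw [pvALoop_nil p hp]; rfl
            | cons d ds =>
              have hdstop : pvNS d = false := pvStop_of_dropWhile _ d ds hd
              have hnp2 : p.isPrefixOf (d :: ds) = false :=
                pvNotPrefix_of_stop p hp hns d ds hdstop
              rw [pvALoop_skip p d ds hnp2 f']
              have hlen := congrArg List.length
                (List.takeWhile_append_dropWhile (p := pvNS) (l := c :: cs))
              rw [hd] at hlen
              simp only [List.length_append, List.length_cons] at hlen
              have hurlpos : 0 < ((c :: cs).takeWhile pvNS).length := by
                rw [List.takeWhile_cons_of_pos hc]; simp
              have hfm : (c :: cs).length < f' + 1 := hf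
              simp only [List.length_cons] at hfm ht
              exact ih ds (by omega) f' (by omega)
        · -- token continues but no match starts at this character
          have hpre' : p.isPrefixOf (c :: cs) = false := Bool.eq_false_iff.mpr hpre
          rw [pvALoop_skip p c cs hpre' f]
          have hfm : (c :: cs).length < f := hf
          simp only [List.length_cons] at hfm ht
          rw [ih cs (by omega) f (by omega), pvSplit_eq (c :: cs), pvSplit_eq cs,
              List.takeWhile_cons_of_pos hc, List.dropWhile_cons_of_pos hc,
              List.filterMap_cons, List.filterMap_cons]
          have hnpt : p.isPrefixOf (c :: cs.takeWhile pvNS) = false := by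
            cases hx : p.isPrefixOf (c :: cs.takeWhile pvNS) with
            | false => rfl
            | true =>
              exfalso
              have h2 : p <+: (c :: cs.takeWhile pvNS) :=
                (List.isPrefixOf_iff_prefix).mp hx
              have h3 : (c :: cs.takeWhile pvNS) <+: (c :: cs) :=
                List.cons_prefix_cons.mpr ⟨rfl, List.takeWhile_prefix _⟩
              have h4 : p.isPrefixOf (c :: cs) = true :=
                (List.isPrefixOf_iff_prefix).mpr (h2.trans h3)
              rw [h4] at hpre'; cases hpre'
          rw [pvMatch_cons_ns p c _ hnpt]
      · -- stop character: both sides skip it (A's find, B's empty token)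
        have hNS : pvNS c = false := by simpa using hc
        have hnp : p.isPrefixOf (c :: cs) = false :=
          pvNotPrefix_of_stop p hp hns c cs hNS
        rw [pvALoop_skip p c cs hnp f, pvSplit_cons_stop c cs hNS,
            List.filterMap_cons, pvMatch_nil p hp]
        have hfm : (c :: cs).length < f := hf
        simp only [List.length_cons] at hfm ht
        exact ih cs (by omega) f (by omega)

-- ===== VERDICT (by name: the statement is the Claim_ definition above) =====
theorem pvPfx1_ne : pvPfx1 ≠ [] := by
  intro h
  have := congrArg List.length h
  simp [pvPfx1] at this

theorem pvPfx2_ne : pvPfx2 ≠ [] := by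
  intro h
  have := congrArg List.length h
  simp [pvPfx2] at this

theorem pvPfx1_ns : forall a, a ∈ pvPfx1 -> pvNS a = true :=
  List.all_eq_true.mp (by rfl)

theorem pvPfx2_ns : forall a, a ∈ pvPfx2 -> pvNS a = true :=
  List.all_eq_true.mp (by rfl)

theorem scan_shopline_urls_spec : Claim_equal_scan_shopline_urls := by
  intro html _
  unfold Spec_scan_shopline_urls scan_shopline_urls scan_shopline_urls_alt
  rw [pvMain pvPfx1 pvPfx1_ne pvPfx1_ns html.toList.length html.toList (le_refl _)
        (html.toList.length + 1) (Nat.lt_succ_self _),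
      pvMain pvPfx2 pvPfx2_ne pvPfx2_ns html.toList.length html.toList (le_refl _)
        (html.toList.length + 1) (Nat.lt_succ_self _)]
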